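-- pv_equiv track=rewrite | github.com/dj-lumiere/problem-solving-boj | 백준/Ruby/13409. Black and White Boxes/Black and White Boxes.py | find_box_number
-- ===== SOURCE A (Python) =====
-- def find_box_number(box_configuration: str) -> int:
--     if not box_configuration:
--         return 0
--     box_list = [1 if i == "B" else -1 for i in box_configuration]
--     sign = 1
--     result = 0
--     multiplier = 1 << 40
--     # 처음이 W면 반대로 생각
--     if box_list[0] == -1:
--         box_list = [-i for i in box_list]
--         sign = -1
--     # 첫번째 색상 변경을 기준으로 생각
--     first_color_change = -1
--     for i, v in enumerate(box_list):
--         if i == 0: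
--             continue
--         if v != box_list[i - 1]:
--             first_color_change = i - 1
--             break
--     # 색상 변경이 없을 경우 길이가 값이 됨
--     if first_color_change == -1:
--         result = multiplier * len(box_configuration) * sign
--         return result
--     # 색상 변경이 있을 경우 색상 변경 이후로는 0.5배씩 등비수열처럼 곱해짐
--     result = multiplier * first_color_change
--     box_list = box_list[first_color_change:]
--     result += sum((multiplier >> i) * v for i, v in enumerate(box_list))
--     return result * sign
-- ===== SOURCE B (Python) =====
-- def geo(x):
--     # sum of the infinite truncated geometric tail: (1<<40>>x) + (1<<40>>x+1) + ...
--     return max(((1 << 41) >> x) - 1, 0)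
--
--
-- def find_box_number(box_configuration: str) -> int:
--     if not box_configuration:
--         return 0
--     # run-length encode the string by colour ('B' vs not-'B')
--     runs = []
--     prev = box_configuration[0] == "B"
--     cnt = 0
--     for c in box_configuration:
--         if (c == "B") == prev:
--             cnt += 1
--         else:
--             runs.append(cnt)
--             prev = not prev
--             cnt = 1
--     runs.append(cnt)
--     sign = 1 if box_configuration[0] == "B" else -1
--     if len(runs) == 1:
--         return (1 << 40) * len(box_configuration) * sign
--     # whole blocks of equal colour contribute a closed-form geometric sum;
--     # the last box of the first run starts the weighted tail as a 1-block
--     result = (1 << 40) * (runs[0] - 1)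
--     pos = 0
--     bsign = 1
--     for l in [1] + runs[1:]:
--         result += bsign * (geo(pos) - geo(pos + l))
--         pos += l
--         bsign = -bsign
--     return result * sign
-- ===== Notes on version B (the rewrite author's own statement) =====
-- stated objective: faster
-- what changed: B run-length-encodes the string by colour and evaluates each whole run with one closed-form geometric-series difference geo(pos)-geo(pos+l), replacing A's materialized +/-1 list, negation pass, slice and per-box (multiplier>>i)*v summation.
import Mathlib
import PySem

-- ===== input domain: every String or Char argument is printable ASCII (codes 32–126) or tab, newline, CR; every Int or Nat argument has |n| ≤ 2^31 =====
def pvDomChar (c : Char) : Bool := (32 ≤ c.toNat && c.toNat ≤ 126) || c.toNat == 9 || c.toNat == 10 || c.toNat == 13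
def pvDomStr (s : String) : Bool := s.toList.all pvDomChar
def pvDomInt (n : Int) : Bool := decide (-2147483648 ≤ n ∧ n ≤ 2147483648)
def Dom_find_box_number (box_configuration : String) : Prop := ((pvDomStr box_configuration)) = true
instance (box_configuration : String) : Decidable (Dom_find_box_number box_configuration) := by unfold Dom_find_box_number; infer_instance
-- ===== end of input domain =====

-- B run-length-encodes the string by colour and evaluates each run by a closed-form geometric
-- sum instead of A's per-box weighted summation over a materialized ±1 list (objective: alternative).

-- ===== PORT A =====

-- the `for i, v in enumerate(box_list)` search for the first colour change (break → i-1, else -1)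
def pvFccAux : List Int → Nat → Int
  | a :: b :: rest, i => if b ≠ a then ((i : Nat) : Int) else pvFccAux (b :: rest) (i + 1)
  | _, _ => -1

-- the `sum((multiplier >> i) * v for i, v in enumerate(box_list))` generator
def pvTailSum (multiplier : Int) : List Int → Nat → Int
  | [], _ => 0
  | v :: rest, i => (multiplier >>> i) * v + pvTailSum multiplier rest (i + 1)

def find_box_number (box_configuration : String) : Int :=
  match box_configuration.toList with
  | [] => 0
  | c0 :: cs =>
    let box_list := (c0 :: cs).map (fun c => if c = 'B' then (1 : Int) else -1)
    let multiplier : Int := 1 <<< (40 : Nat)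
    -- `if box_list[0] == -1: box_list = [-i for i in box_list]; sign = -1`
    let p := if box_list.headI = -1 then (box_list.map (fun x => -x), (-1 : Int)) else (box_list, 1)
    let box_list := p.1
    let sign := p.2
    let fcc := pvFccAux box_list 0
    if fcc = -1 then
      multiplier * (((c0 :: cs).length : Nat) : Int) * sign
    else
      let result := multiplier * fcc
      let tail := PySem.List.slice box_list (some fcc) none  -- box_list[first_color_change:]
      (result + pvTailSum multiplier tail 0) * sign

-- ===== PORT B =====

-- `geo(x) = max(((1 << 41) >> x) - 1, 0)`
def pvGeo (x : Nat) : Int := max (((1 <<< (41 : Nat) : Int) >>> x) - 1) 0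

-- the run-length-encoding `for c in box_configuration` loop with state (prev, cnt, runs)
def pvRunsAux (prev : Bool) (cnt : Nat) : List Char → List Nat
  | [] => [cnt]
  | c :: rest =>
      if (c == 'B') = prev then pvRunsAux prev (cnt + 1) rest
      else cnt :: pvRunsAux (!prev) 1 rest

-- the `for l in [1] + runs[1:]` loop with state (result accumulator, pos, bsign)
def pvBlockFold : List Nat → Nat → Int → Int
  | [], _, _ => 0
  | l :: rest, pos, bs => bs * (pvGeo pos - pvGeo (pos + l)) + pvBlockFold rest (pos + l) (-bs)

def find_box_number_alt (box_configuration : String) : Int :=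
  match box_configuration.toList with
  | [] => 0
  | c0 :: cs =>
    let prev : Bool := c0 == 'B'
    let runs := pvRunsAux prev 0 (c0 :: cs)
    let sign : Int := if c0 == 'B' then 1 else -1
    if runs.length = 1 then
      (1 <<< (40 : Nat) : Int) * (((c0 :: cs).length : Nat) : Int) * sign
    else
      ((1 <<< (40 : Nat) : Int) * ((runs.headI : Int) - 1) + pvBlockFold (1 :: runs.tail) 0 1) * sign

-- ===== PRECONDITION & SPEC =====
def Spec_find_box_number (box_configuration : String) (out : Int) : Prop := out = find_box_number_alt box_configuration
instance (box_configuration : String) (out : Int) : Decidable (Spec_find_box_number box_configuration out) := by unfold Spec_find_box_number; infer_instance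

-- ===== CLAIM (what is proved, stated in full; the proofs are below) =====
def Claim_equal_find_box_number : Prop := ∀ (box_configuration : String), Dom_find_box_number box_configuration → Spec_find_box_number box_configuration (find_box_number box_configuration)

-- ===== LEMMAS AND PROOFS =====

-- the normalized ±1 value of a character relative to the leading colour
def pvF (lead : Bool) (c : Char) : Int := if (c == 'B') = lead then 1 else -1

-- proof-only: length of the leading same-colour run
def pvRunLen (lead : Bool) : List Char → Nat
  | [] => 0
  | c :: rest => if (c == 'B') = lead then 1 + pvRunLen lead rest else 0

-- proof-only: pointwise weighted tail sum over the raw characters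
def pvTailAcc (lead : Bool) (M : Int) : List Char → Nat → Int
  | [], _ => 0
  | c :: rest, sh => (M >>> sh) * pvF lead c + pvTailAcc lead M rest (sh + 1)

-- proof-only reference form shared by both halves of the proof: leading run + pointwise tail
def pvRef (s : String) : Int :=
  match s.toList with
  | [] => 0
  | c0 :: cs =>
    let M : Int := 1 <<< (40 : Nat)
    let lead : Bool := c0 == 'B'
    let sign : Int := if lead then 1 else -1
    let run : Nat := 1 + pvRunLen lead cs
    if run = (c0 :: cs).length then M * (((c0 :: cs).length : Nat) : Int) * sign
    else (M * (run : Int) + pvTailAcc lead M (cs.drop (run - 1)) 1) * sign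

theorem pvF_true : (fun c => if c = 'B' then (1 : Int) else -1) = pvF true := by
  funext c; by_cases h : c = 'B' <;> simp [pvF, h]

theorem pvF_false : ((fun x => -x) ∘ fun c => if c = 'B' then (1 : Int) else -1) = pvF false := by
  funext c; by_cases h : c = 'B' <;> simp [pvF, Function.comp, h]

theorem pvFccAux_norm (lead : Bool) :
    ∀ (cs : List Char) (i : Nat),
      pvFccAux (1 :: cs.map (pvF lead)) i =
        if pvRunLen lead cs = cs.length then -1 else (((i + pvRunLen lead cs : Nat)) : Int) := by
  intro cs
  induction cs with
  | nil => intro i; simp [pvFccAux, pvRunLen]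
  | cons c rest ih =>
    intro i
    by_cases h : (c == 'B') = lead
    · have h1 : pvF lead c = 1 := by simp [pvF, h]
      simp only [List.map_cons, pvFccAux, h1, pvRunLen, h, if_true, ne_eq, not_true_eq_false,
        if_false]
      rw [ih (i + 1)]
      by_cases hk : pvRunLen lead rest = rest.length
      · simp [hk]
        intro hx
        exact absurd (by omega) hx
      · have : ¬ (1 + pvRunLen lead rest = (c :: rest).length) := by
          simp [List.length_cons]; omega
        simp [hk]
        omega
    · have h1 : pvF lead c = -1 := by simp [pvF, h]
      simp [pvFccAux, h1, pvRunLen, h]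

theorem pvTailAcc_eq (lead : Bool) (M : Int) :
    ∀ (cs : List Char) (sh : Nat), pvTailAcc lead M cs sh = pvTailSum M (cs.map (pvF lead)) sh := by
  intro cs
  induction cs with
  | nil => intro sh; simp [pvTailAcc, pvTailSum]
  | cons c rest ih => intro sh; simp [pvTailAcc, pvTailSum, pvF, ih]

theorem pvDrop_run (lead : Bool) :
    ∀ (cs : List Char) (j : Nat), j < pvRunLen lead cs →
      (cs.map (pvF lead)).drop j = 1 :: (cs.map (pvF lead)).drop (j + 1) := by
  intro cs
  induction cs with
  | nil => intro j hj; simp [pvRunLen] at hj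
  | cons c rest ih =>
    intro j hj
    by_cases h : (c == 'B') = lead
    · have h1 : pvF lead c = 1 := by simp [pvF, h]
      cases j with
      | zero => simp [h1]
      | succ j' =>
        have hj' : j' < pvRunLen lead rest := by
          simp [pvRunLen, h] at hj; omega
        simpa using ih j' hj'
    · simp [pvRunLen, h] at hj

theorem pvDrop_norm (lead : Bool) (cs : List Char) :
    ((1 : Int) :: cs.map (pvF lead)).drop (pvRunLen lead cs) =
      1 :: (cs.map (pvF lead)).drop (pvRunLen lead cs) := by
  rcases hk : pvRunLen lead cs with _ | j
  · simp
  · have hj : j < pvRunLen lead cs := by omega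
    have h2 := pvDrop_run lead cs j hj
    simp only [List.drop_succ_cons]
    exact h2

theorem pvCore_eq (lead : Bool) (cs : List Char) (M : Int) :
    (if pvFccAux (1 :: cs.map (pvF lead)) 0 = -1 then
       M * ((cs.length + 1 : Nat) : Int)
     else
       M * pvFccAux (1 :: cs.map (pvF lead)) 0 +
         pvTailSum M
           (PySem.List.slice (1 :: cs.map (pvF lead)) (some (pvFccAux (1 :: cs.map (pvF lead)) 0)) none) 0)
    =
    (if 1 + pvRunLen lead cs = cs.length + 1 then
       M * ((cs.length + 1 : Nat) : Int)
     else
       M * ((1 + pvRunLen lead cs : Nat) : Int) +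
         pvTailAcc lead M (cs.drop (1 + pvRunLen lead cs - 1)) 1) := by
  rw [pvFccAux_norm]
  by_cases hk : pvRunLen lead cs = cs.length
  · simp [hk]
    intro hx
    exact absurd (by omega) hx
  · have hrun : ¬ (1 + pvRunLen lead cs = cs.length + 1) := by omega
    have hnn : (((0 + pvRunLen lead cs : Nat)) : Int) ≠ -1 := by
      have : (0:Int) ≤ ((0 + pvRunLen lead cs : Nat) : Int) := Int.natCast_nonneg _
      omega
    rw [if_neg hk, if_neg hnn, if_neg hrun]
    rw [PySem.List.slice_from_natCast]
    simp only [Nat.zero_add]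
    rw [pvDrop_norm]
    rw [pvTailAcc_eq, ← List.map_drop]
    simp only [pvTailSum]
    push_cast
    ring_nf
    simp [Int.shiftRight_zero]
    ring

theorem pvA_eq_ref (s : String) : find_box_number s = pvRef s := by
  unfold find_box_number pvRef
  cases hs : s.toList with
  | nil => rfl
  | cons c0 cs =>
    by_cases hc : c0 = 'B'
    · subst hc
      rw [pvF_true]
      simp only [List.map_cons, List.headI_cons]
      have hne1 : ¬(pvF true 'B' = -1) := by decide
      rw [if_neg hne1]
      have hB : pvF true 'B' = 1 := rfl
      have hBB : (('B' : Char) == 'B') = true := rfl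
      simp only [hB, hBB, if_true, mul_one, List.length_cons]
      have h := pvCore_eq true cs ((1 <<< 40 : Nat) : Int)
      split_ifs at h ⊢ <;> exact h
    · have hl : (c0 == 'B') = false := by simp [hc]
      simp only [List.map_cons, List.headI_cons, List.length_cons]
      rw [if_neg hc, if_pos rfl]
      simp only [List.map_map, neg_neg]
      rw [pvF_false]
      simp only [hl, Bool.false_eq_true, if_false]
      have h := pvCore_eq false cs ((1 <<< 40 : Nat) : Int)
      split_ifs at h ⊢ <;> rw [h]

-- ===== the B half: run-length encoding + geometric block sums equals the pointwise scan =====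

theorem pvGeo_step (x : Nat) : pvGeo x = ((1 <<< (40 : Nat) : Int) >>> x) + pvGeo (x + 1) := by
  have h40 : (1 <<< (40 : Nat) : Int) = 2 ^ 40 := by decide
  have h41 : (1 <<< (41 : Nat) : Int) = 2 ^ 41 := by decide
  have hdiv : ∀ (a b : Nat), b ≤ a → (2 : Int) ^ a / 2 ^ b = 2 ^ (a - b) := by
    intro a b h
    have : (2 : Int) ^ a = 2 ^ (a - b) * 2 ^ b := by rw [← pow_add]; congr 1; omega
    rw [this, Int.mul_ediv_cancel _ (by positivity)]
  have hz : ∀ (a b : Nat), a < b → (2 : Int) ^ a / 2 ^ b = 0 := by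
    intro a b h
    exact Int.ediv_eq_zero_of_lt (by positivity) (pow_lt_pow_right₀ (by norm_num) h)
  unfold pvGeo
  rw [h40, h41, Int.shiftRight_eq_div_pow, Int.shiftRight_eq_div_pow, Int.shiftRight_eq_div_pow]
  push_cast
  have e41 : (2199023255552 : Int) = 2 ^ 41 := by decide
  have e40 : (1099511627776 : Int) = 2 ^ 40 := by decide
  rw [e41, e40]
  by_cases hx : x ≤ 40
  · rw [hdiv 41 x (by omega), hdiv 40 x hx, hdiv 41 (x + 1) (by omega)]
    have e2 : 41 - (x + 1) = 40 - x := by omega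
    have e1 : (2 : Int) ^ (41 - x) = 2 ^ (40 - x) + 2 ^ (40 - x) := by
      have h : 41 - x = (40 - x) + 1 := by omega
      rw [h, pow_succ]; ring
    have p1 : (1 : Int) ≤ 2 ^ (40 - x) := one_le_pow₀ (by norm_num)
    rw [e2, max_eq_left (by linarith), max_eq_left (by linarith)]
    linarith
  · rw [hz 40 x (by omega)]
    by_cases hx41 : x = 41
    · subst hx41
      rw [hdiv 41 41 le_rfl, hz 41 42 (by omega)]
      norm_num
    · rw [hz 41 x (by omega), hz 41 (x + 1) (by omega)]
      norm_num

theorem pvRunLen_le (lead : Bool) : ∀ (cs : List Char), pvRunLen lead cs ≤ cs.length := by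
  intro cs
  induction cs with
  | nil => simp [pvRunLen]
  | cons c rest ih =>
    by_cases h : (c == 'B') = lead <;> simp [pvRunLen, h]
    omega

theorem pvRunsAux_eq :
    ∀ (cs : List Char) (prev : Bool) (k : Nat),
      pvRunsAux prev k cs =
        (k + pvRunLen prev cs) ::
          (if pvRunLen prev cs = cs.length then []
           else pvRunsAux (!prev) 1 (cs.drop (pvRunLen prev cs + 1))) := by
  intro cs
  induction cs with
  | nil => intro prev k; simp [pvRunsAux, pvRunLen]
  | cons c rest ih =>
    intro prev k
    by_cases h : (c == 'B') = prev
    · simp only [pvRunsAux, h, if_true]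
      rw [ih prev (k + 1)]
      simp only [pvRunLen, h, if_true, List.length_cons]
      by_cases hk : pvRunLen prev rest = rest.length
      · simp [hk]; omega
      · have h2 : ¬ (1 + pvRunLen prev rest = rest.length + 1) := by omega
        rw [if_neg hk, if_neg h2]
        have h3 : 1 + pvRunLen prev rest + 1 = (pvRunLen prev rest + 1) + 1 := by omega
        rw [h3, List.drop_succ_cons]
        congr 1
        omega
    · simp only [pvRunsAux, h, if_false]
      simp only [pvRunLen, h, if_false, List.length_cons]
      have h2 : ¬ (0 = rest.length + 1) := by omega
      rw [if_neg h2]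
      simp

theorem pvFirst_change (lead : Bool) :
    ∀ (cs : List Char), pvRunLen lead cs < cs.length →
      ∃ d, cs.drop (pvRunLen lead cs) = d :: cs.drop (pvRunLen lead cs + 1) ∧ ¬ ((d == 'B') = lead) := by
  intro cs
  induction cs with
  | nil => intro h; simp [pvRunLen] at h
  | cons c rest ih =>
    intro h
    by_cases hc : (c == 'B') = lead
    · have h' : pvRunLen lead rest < rest.length := by
        simp [pvRunLen, hc] at h ⊢; omega
      obtain ⟨d, hd1, hd2⟩ := ih h'
      refine ⟨d, ?_, hd2⟩
      simp only [pvRunLen, hc, if_true]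
      have e : 1 + pvRunLen lead rest = (pvRunLen lead rest) + 1 := by omega
      rw [e, List.drop_succ_cons, hd1]
      congr 1
    · exact ⟨c, by simp [pvRunLen, hc], hc⟩

theorem pvBlockFold_runs (lead : Bool) :
    ∀ (cs : List Char) (prev : Bool) (k pos : Nat) (bs : Int),
      bs = (if prev = lead then 1 else -1) →
      pvBlockFold (pvRunsAux prev k cs) pos bs =
        bs * (pvGeo pos - pvGeo (pos + k)) + pvTailAcc lead (1 <<< (40 : Nat)) cs (pos + k) := by
  intro cs
  induction cs with
  | nil => intro prev k pos bs hbs; simp [pvRunsAux, pvBlockFold, pvTailAcc]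
  | cons c rest ih =>
    intro prev k pos bs hbs
    by_cases h : (c == 'B') = prev
    · simp only [pvRunsAux, h, if_true]
      rw [ih prev (k + 1) pos bs hbs]
      have hF : pvF lead c = bs := by
        rw [hbs]; simp only [pvF, h]
      simp only [pvTailAcc, hF]
      have hstep := pvGeo_step (pos + k)
      have e : pos + (k + 1) = (pos + k) + 1 := by omega
      rw [e]
      linear_combination bs * hstep
    · simp only [pvRunsAux, h, if_false, pvBlockFold]
      rw [ih (!prev) 1 (pos + k) (-bs) (by rw [hbs]; cases prev <;> cases lead <;> simp)]
      have hF : pvF lead c = -bs := by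
        rw [hbs]
        cases hcb : (c == 'B') <;> cases prev <;> cases lead <;> simp_all [pvF]
      simp only [pvTailAcc, hF]
      have hstep := pvGeo_step (pos + k)
      linear_combination (-bs) * hstep

theorem pvRef_eq_alt (s : String) : pvRef s = find_box_number_alt s := by
  unfold pvRef find_box_number_alt
  cases hs : s.toList with
  | nil => rfl
  | cons c0 cs =>
    simp only
    have hrw0 : pvRunsAux (c0 == 'B') 0 (c0 :: cs) = pvRunsAux (c0 == 'B') 1 cs := by
      simp [pvRunsAux]
    rw [hrw0, pvRunsAux_eq]
    have hle := pvRunLen_le (c0 == 'B') cs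
    by_cases hk : pvRunLen (c0 == 'B') cs = cs.length
    · rw [if_pos hk]
      have c1 : 1 + pvRunLen (c0 == 'B') cs = (c0 :: cs).length := by
        simp [List.length_cons]; omega
      rw [if_pos c1]
      simp
    · have hlt : pvRunLen (c0 == 'B') cs < cs.length := by omega
      have hne : ¬ (1 + pvRunLen (c0 == 'B') cs = cs.length + 1) := by omega
      rw [if_neg hk]
      simp only [List.length_cons, List.length_cons, List.headI_cons, List.tail_cons]
      rw [if_neg hne]
      have hlen2 : ¬ ((pvRunsAux (!(c0 == 'B')) 1 (cs.drop (pvRunLen (c0 == 'B') cs + 1))).length + 1 = 1) := by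
        rw [pvRunsAux_eq]; simp
      rw [if_neg hlen2]
      -- expand B's block fold
      simp only [pvBlockFold]
      rw [pvBlockFold_runs (c0 == 'B') _ (!(c0 == 'B')) 1 (0 + 1) (-1)
            (by cases hcb : (c0 == 'B') <;> simp)]
      -- expand the reference tail using the first changed character
      obtain ⟨d, hd1, hd2⟩ := pvFirst_change (c0 == 'B') cs hlt
      have e1 : 1 + pvRunLen (c0 == 'B') cs - 1 = pvRunLen (c0 == 'B') cs := by omega
      rw [e1, hd1]
      simp only [pvTailAcc]
      have hFd : pvF (c0 == 'B') d = -1 := by simp [pvF, hd2]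
      rw [hFd]
      have h0 := pvGeo_step 0
      have h1 := pvGeo_step 1
      have hsh0 : ((1 <<< (40 : Nat) : Int) >>> (0 : Nat)) = (1 <<< (40 : Nat) : Int) := rfl
      rw [hsh0] at h0
      have hM : (((1 <<< 40 : Nat)) : Int) = 1099511627776 := by decide
      rw [hM] at h0 h1
      push_cast
      by_cases hb : (c0 == 'B') = true
      · simp only [if_pos hb]
        linear_combination h1 - h0
      · simp only [if_neg hb]
        linear_combination h0 - h1

-- ===== VERDICT (by name: the statement is the Claim_ definition above) =====
theorem find_box_number_spec : Claim_equal_find_box_number := by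
  intro s _
  unfold Spec_find_box_number
  rw [pvA_eq_ref, pvRef_eq_alt]
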